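-- pv_equiv track=rewrite | github.com/kuznetsovvj/education | algorithms/codeforces/1843b.py | check
-- ===== SOURCE A (Python) =====
-- def check(seq):
--     res_s, res_t = 0, 0
--     negative = False
--     for i in seq:
--         res_s += abs(i)
--         if i < 0:
--             if not negative:
--                 negative = True
--                 res_t += 1
--         if i > 0:
--             if negative:
--                 negative = False
--     return f"{res_s} {res_t}"
-- ===== SOURCE B (Python) =====
-- def check(seq):
--     s = sum(abs(x) for x in seq)
--     nz = [x for x in seq if x != 0]
--     t = sum(1 for prev, cur in zip([1] + nz, nz) if cur < 0 and prev > 0)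
--     return f"{s} {t}"
-- ===== Notes on version B (the rewrite author's own statement) =====
-- stated objective: idiomatic
-- what changed: Replaces the fused state-machine loop (running flag 'negative') with two aggregations: a sum of absolute values, and a count of negative-run starts obtained by filtering out zeros and counting negative elements whose predecessor (via zip with a shifted copy) is positive.
import Mathlib
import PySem

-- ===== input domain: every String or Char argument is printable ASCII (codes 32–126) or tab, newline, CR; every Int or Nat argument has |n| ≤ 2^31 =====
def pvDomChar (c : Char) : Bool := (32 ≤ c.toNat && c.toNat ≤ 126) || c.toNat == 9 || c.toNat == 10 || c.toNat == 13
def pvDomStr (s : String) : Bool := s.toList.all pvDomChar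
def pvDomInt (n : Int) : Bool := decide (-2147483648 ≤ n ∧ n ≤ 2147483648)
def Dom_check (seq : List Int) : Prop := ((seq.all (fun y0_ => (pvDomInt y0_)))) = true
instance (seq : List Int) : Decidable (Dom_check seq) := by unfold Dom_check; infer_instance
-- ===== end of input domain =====

-- B splits A's fused flag-carrying loop into two aggregations (sum of |x|; count of
-- negative-run starts via filter-zeros + zip-with-shift); objective: idiomatic.

-- ===== PORT A =====
-- one step of A's loop over state (res_s, res_t, negative)
def checkStep (st : Int × Int × Bool) (i : Int) : Int × Int × Bool :=
  let s := st.1 + |i|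
  let (t, neg) :=
    if i < 0 then (if !st.2.2 then (st.2.1 + 1, true) else (st.2.1, st.2.2))
    else (st.2.1, st.2.2)
  let neg' := if i > 0 then (if neg then false else neg) else neg
  (s, t, neg')

def check (seq : List Int) : String :=
  let r := seq.foldl checkStep (0, 0, false)
  PySem.Int.toStr r.1 ++ " " ++ PySem.Int.toStr r.2.1

-- ===== PORT B =====
def check_alt (seq : List Int) : String :=
  let s := (seq.map (fun x => |x|)).sum
  let nz := seq.filter (fun x => decide (x ≠ 0))
  let t := ((((1 : Int) :: nz).zip nz).countP (fun p => decide (p.2 < 0 ∧ 0 < p.1)) : Nat)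
  PySem.Int.toStr s ++ " " ++ PySem.Int.toStr (t : Int)

-- ===== PRECONDITION & SPEC =====
def Spec_check (seq : List Int) (out : String) : Prop := out = check_alt seq
instance (seq : List Int) (out : String) : Decidable (Spec_check seq out) := by unfold Spec_check; infer_instance

-- ===== CLAIM (what is proved, stated in full; the proofs are below) =====
def Claim_equal_check : Prop := ∀ (seq : List Int), Dom_check seq → Spec_check seq (check seq)

-- ===== LEMMAS AND PROOFS =====

-- A's block count, as a recursion on the list carrying the 'negative' flag
def cnt (neg : Bool) : List Int → Nat
  | [] => 0
  | x :: xs =>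
    if x < 0 then (if neg then 0 else 1) + cnt true xs
    else if x > 0 then cnt false xs
    else cnt neg xs

-- A's final 'negative' flag
def negAfter (neg : Bool) : List Int → Bool
  | [] => neg
  | x :: xs =>
    if x < 0 then negAfter true xs
    else if x > 0 then negAfter false xs
    else negAfter neg xs

-- B's zip-count, as a recursion carrying the previous element
def g (p : Int) : List Int → Nat
  | [] => 0
  | x :: xs => (if x < 0 ∧ 0 < p then 1 else 0) + g x xs

-- zeros filtered out (B's nz list)
def nzf (xs : List Int) : List Int := xs.filter (fun y => decide (y ≠ 0))

theorem nzf_cons (x : Int) (xs : List Int) :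
    nzf (x :: xs) = if x = 0 then nzf xs else x :: nzf xs := by
  by_cases h : x = 0 <;> simp [nzf, h]

theorem countP_zip_eq_g (nz : List Int) : ∀ p : Int,
    ((p :: nz).zip nz).countP (fun q => decide (q.2 < 0 ∧ 0 < q.1)) = g p nz := by
  induction nz with
  | nil => intro p; simp [g]
  | cons x xs ih =>
    intro p
    rw [List.zip_cons_cons, List.countP_cons, ih x]
    by_cases h : x < 0 ∧ 0 < p <;> simp [g, h, Nat.add_comm]

theorem g_congr (nz : List Int) : ∀ p q : Int, (0 < p ↔ 0 < q) → g p nz = g q nz := by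
  induction nz with
  | nil => intro p q _; rfl
  | cons x xs _ =>
    intro p q h
    simp only [g]
    congr 1
    by_cases hx : x < 0 <;> simp [hx, h]

theorem cnt_eq_g (xs : List Int) : ∀ neg : Bool,
    cnt neg xs = g (if neg then -1 else 1) (nzf xs) := by
  induction xs with
  | nil => intro neg; rfl
  | cons x xs ih =>
    intro neg
    rcases lt_trichotomy x 0 with hx | hx | hx
    · have hne : x ≠ 0 := ne_of_lt hx
      have h1 : g x (nzf xs) = g (-1) (nzf xs) := g_congr _ x (-1) (by omega)
      rw [nzf_cons, if_neg hne]
      cases neg <;> simp [cnt, g, hx, ih, h1]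
    · subst hx
      rw [nzf_cons, if_pos rfl]
      simp [cnt, ih neg]
    · have hne : x ≠ 0 := ne_of_gt hx
      have hnlt : ¬ x < 0 := not_lt_of_gt hx
      have h1 : g x (nzf xs) = g 1 (nzf xs) := g_congr _ x 1 (by omega)
      rw [nzf_cons, if_neg hne]
      cases neg <;> simp [cnt, g, hx, hnlt, ih, h1]

theorem fold_eq (xs : List Int) : ∀ (s t : Int) (neg : Bool),
    xs.foldl checkStep (s, t, neg) =
      (s + (xs.map (fun x => |x|)).sum, t + (cnt neg xs : Int), negAfter neg xs) := by
  induction xs with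
  | nil => intro s t neg; simp [negAfter]
  | cons x xs ih =>
    intro s t neg
    rcases lt_trichotomy x 0 with hx | hx | hx
    · have hnlt : ¬ x > 0 := by omega
      cases neg <;>
        · simp only [List.foldl_cons, checkStep, ih, cnt, negAfter, List.map_cons, List.sum_cons]
          simp [hx, hnlt]
          (try constructor) <;> push_cast <;> ring
    · subst hx
      simp [List.foldl_cons, checkStep, ih, cnt, negAfter]
    · have hnlt : ¬ x < 0 := by omega
      cases neg <;>
        · simp only [List.foldl_cons, checkStep, ih, cnt, negAfter, List.map_cons, List.sum_cons]
          simp [hx, hnlt]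
          (try constructor) <;> push_cast <;> ring

-- ===== VERDICT (by name: the statement is the Claim_ definition above) =====
theorem check_spec : Claim_equal_check := by
  intro seq _
  show check seq = check_alt seq
  have hnz : seq.filter (fun x => decide (x ≠ 0)) = nzf seq := rfl
  simp only [check, check_alt, fold_eq, hnz, countP_zip_eq_g]
  have h1 : cnt false seq = g 1 (nzf seq) := by simpa using cnt_eq_g seq false
  simp [h1]
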